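-- pv_equiv track=rewrite | github.com/11hertz/codingTest_Python | 프로그래머스/0/181880. 1로 만들기/1로 만들기.py | solution
-- ===== SOURCE A (Python) =====
-- def solution(num_list):
--     def makeOne(num):
--         count = 0
--         while num > 1:
--             if num % 2 == 0 : num /= 2
--             else : num = (num - 1) / 2
--             count += 1
--         return count
--
--     return sum(makeOne(x) for x in num_list)
-- ===== SOURCE B (Python) =====
-- def solution(num_list):
--     # closed form: reducing x>=2 to 1 by halving takes floor(log2 x) = bit_length-1 steps
--     return sum(x.bit_length() - 1 for x in num_list if x > 1)
-- ===== Notes on version B (the rewrite author's own statement) =====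
-- stated objective: faster
-- what changed: Replaces the per-element halving loop by the closed form bit_length(x)-1 (summed over elements greater than 1).
import Mathlib
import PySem

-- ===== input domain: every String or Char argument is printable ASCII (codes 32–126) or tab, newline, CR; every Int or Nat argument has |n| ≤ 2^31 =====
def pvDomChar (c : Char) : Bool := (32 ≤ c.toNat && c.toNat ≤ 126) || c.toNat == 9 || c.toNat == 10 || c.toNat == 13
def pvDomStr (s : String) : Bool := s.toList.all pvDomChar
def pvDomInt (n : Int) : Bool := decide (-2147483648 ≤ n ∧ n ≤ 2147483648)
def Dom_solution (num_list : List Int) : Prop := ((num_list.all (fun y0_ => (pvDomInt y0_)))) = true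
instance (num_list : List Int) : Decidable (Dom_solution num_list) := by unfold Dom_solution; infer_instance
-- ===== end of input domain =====

-- B replaces A's per-element halving loop by the closed form bit_length(x)-1 summed over x > 1.

-- ===== PORT A =====
-- A's inner while loop; Python's '/' returns floats, but on this domain (|n| ≤ 2^31) all
-- intermediate values are integer-valued floats represented exactly, so Int arithmetic is exact:
-- 'num /= 2' fires only when num is even and '(num-1)/2' only when num is odd.
def makeOneLoop (num : Int) (count : Int) : Int :=
  if h : num > 1 then
    if num % 2 == 0 then makeOneLoop (num / 2) (count + 1)
    else makeOneLoop ((num - 1) / 2) (count + 1)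
  else count
termination_by num.toNat
decreasing_by all_goals omega

def makeOne (num : Int) : Int := makeOneLoop num 0

def solution (num_list : List Int) : Int :=
  num_list.foldl (fun acc x => acc + makeOne x) 0

-- ===== PORT B =====
def solution_alt (num_list : List Int) : Int :=
  ((num_list.filter (fun x => decide (x > 1))).map
    (fun x => ((PySem.Int.bitLength x : Int) - 1))).sum

-- ===== PRECONDITION & SPEC =====
def Spec_solution (num_list : List Int) (out : Int) : Prop := out = solution_alt num_list
instance (num_list : List Int) (out : Int) : Decidable (Spec_solution num_list out) := by unfold Spec_solution; infer_instance

-- ===== CLAIM (what is proved, stated in full; the proofs are below) =====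
def Claim_equal_solution : Prop := ∀ (num_list : List Int), Dom_solution num_list → Spec_solution num_list (solution num_list)

-- ===== LEMMAS AND PROOFS =====

theorem makeOneLoop_eq (n c : Int) :
    makeOneLoop n c = c + (if n > 1 then ((PySem.Int.bitLength n : Int) - 1) else 0) := by
  induction n, c using makeOneLoop.induct with
  | case1 n c h heven ih =>
      have hb : (PySem.Int.bitLength n : Int) = (PySem.Int.bitLength (n / 2) : Int) + 1 := by
        rw [PySem.Int.bitLength_of_pos (by omega),
            PySem.Int.floordiv_eq_ediv_of_pos (by omega : (0:Int) < 2)]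
        push_cast; ring
      rw [makeOneLoop, dif_pos h, if_pos heven, ih, if_pos h]
      by_cases h2 : n / 2 > 1
      · rw [if_pos h2]; omega
      · have hn2 : n / 2 = 1 := by omega
        have h1 : (PySem.Int.bitLength (1 : Int) : Int) = 1 := by decide
        rw [hn2] at hb
        rw [if_neg h2]; omega
  | case2 n c h heven ih =>
      have hodd : n % 2 = 1 := by
        rcases Int.emod_two_eq_zero_or_one n with h0 | h1
        · exact absurd (by simpa using h0) heven
        · exact h1
      have hhalf : (n - 1) / 2 = n / 2 := by omega
      have hb : (PySem.Int.bitLength n : Int) = (PySem.Int.bitLength (n / 2) : Int) + 1 := by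
        rw [PySem.Int.bitLength_of_pos (by omega),
            PySem.Int.floordiv_eq_ediv_of_pos (by omega : (0:Int) < 2)]
        push_cast; ring
      rw [makeOneLoop, dif_pos h, if_neg heven, ih, hhalf, if_pos h]
      by_cases h2 : n / 2 > 1
      · rw [if_pos h2]; omega
      · have hn2 : n / 2 = 1 := by omega
        have h1 : (PySem.Int.bitLength (1 : Int) : Int) = 1 := by decide
        rw [hn2] at hb
        rw [if_neg h2]; omega
  | case3 n c h =>
      rw [makeOneLoop, dif_neg h, if_neg h]; ring

theorem foldl_makeOne (l : List Int) (c : Int) :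
    l.foldl (fun acc x => acc + makeOne x) c = c + solution_alt l := by
  induction l generalizing c with
  | nil => simp [solution_alt]
  | cons x l ih =>
      simp only [List.foldl_cons, ih]
      simp only [solution_alt, List.filter_cons]
      by_cases hx : x > 1
      · simp [hx, makeOne, makeOneLoop_eq]; ring
      · simp [hx, makeOne, makeOneLoop_eq]

-- ===== VERDICT (by name: the statement is the Claim_ definition above) =====
theorem solution_spec : Claim_equal_solution := by
  intro l _
  unfold Spec_solution solution
  rw [foldl_makeOne]
  ring
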